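-- pv_equiv track=rewrite | github.com/pk-ai/challenges | sudoku/csp/driver_3.py | getReducedDomains
-- ===== SOURCE A (Python) =====
-- constraints = [
--     ['A1', 'A2', 'A3', 'A4', 'A5', 'A6', 'A7', 'A8', 'A9'],
--     ['B1', 'B2', 'B3', 'B4', 'B5', 'B6', 'B7', 'B8', 'B9'],
--     ['C1', 'C2', 'C3', 'C4', 'C5', 'C6', 'C7', 'C8', 'C9'],
--     ['D1', 'D2', 'D3', 'D4', 'D5', 'D6', 'D7', 'D8', 'D9'],
--     ['E1', 'E2', 'E3', 'E4', 'E5', 'E6', 'E7', 'E8', 'E9'],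
--     ['F1', 'F2', 'F3', 'F4', 'F5', 'F6', 'F7', 'F8', 'F9'],
--     ['G1', 'G2', 'G3', 'G4', 'G5', 'G6', 'G7', 'G8', 'G9'],
--     ['H1', 'H2', 'H3', 'H4', 'H5', 'H6', 'H7', 'H8', 'H9'],
--     ['I1', 'I2', 'I3', 'I4', 'I5', 'I6', 'I7', 'I8', 'I9'],
--     ['A1', 'B1', 'C1', 'D1', 'E1', 'F1', 'G1', 'H1', 'I1'],
--     ['A2', 'B2', 'C2', 'D2', 'E2', 'F2', 'G2', 'H2', 'I2'],
--     ['A3', 'B3', 'C3', 'D3', 'E3', 'F3', 'G3', 'H3', 'I3'],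
--     ['A4', 'B4', 'C4', 'D4', 'E4', 'F4', 'G4', 'H4', 'I4'],
--     ['A5', 'B5', 'C5', 'D5', 'E5', 'F5', 'G5', 'H5', 'I5'],
--     ['A6', 'B6', 'C6', 'D6', 'E6', 'F6', 'G6', 'H6', 'I6'],
--     ['A7', 'B7', 'C7', 'D7', 'E7', 'F7', 'G7', 'H7', 'I7'],
--     ['A8', 'B8', 'C8', 'D8', 'E8', 'F8', 'G8', 'H8', 'I8'],
--     ['A9', 'B9', 'C9', 'D9', 'E9', 'F9', 'G9', 'H9', 'I9'],
--     ['A1', 'A2', 'A3', 'B1', 'B2', 'B3', 'C1', 'C2', 'C3'],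
--     ['D1', 'D2', 'D3', 'E1', 'E2', 'E3', 'F1', 'F2', 'F3'],
--     ['G1', 'G2', 'G3', 'H1', 'H2', 'H3', 'I1', 'I2', 'I3'],
--     ['A4', 'A5', 'A6', 'B4', 'B5', 'B6', 'C4', 'C5', 'C6'],
--     ['D4', 'D5', 'D6', 'E4', 'E5', 'E6', 'F4', 'F5', 'F6'],
--     ['G4', 'G5', 'G6', 'H4', 'H5', 'H6', 'I4', 'I5', 'I6'],
--     ['A7', 'A8', 'A9', 'B7', 'B8', 'B9', 'C7', 'C8', 'C9'],
--     ['D7', 'D8', 'D9', 'E7', 'E8', 'E9', 'F7', 'F8', 'F9'],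
--     ['G7', 'G8', 'G9', 'H7', 'H8', 'H9', 'I7', 'I8', 'I9']
-- ]
--
-- def getReducedDomains(varVals, orgDomains, unassigned_var):
--     # Reducing the domain by checking the applicable constraints
--     # Get the applicable constraints which have the unassigned_var. i.e.
--     # Application row wise, column wise and 3x3 box wise
--     # From the applicable constraints, get only assigned vars and not the
--     # unassigned_var to build assigned_vars
--     assigned_vars = []
--     for constraint in constraints:
--         if unassigned_var in constraint:
--             for el in constraint:
--                 if el != unassigned_var and el not in assigned_vars and varVals.get(el, '0') != '0':
--                     assigned_vars.append(el)
--     # From the built assigned vars, get the values and remove them from the domains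
--     for el in assigned_vars:
--         if varVals[el] in orgDomains:
--             orgDomains.remove(varVals[el])
--     # Returning reduced domain
--     return orgDomains
-- ===== SOURCE B (Python) =====
-- # Same result via a precomputed peer index (arithmetic on row/column) plus a
-- # single counting pass over the domain list, instead of scanning all 27
-- # constraints and calling list.remove repeatedly.
-- _ROWS = ['A', 'B', 'C', 'D', 'E', 'F', 'G', 'H', 'I']
-- _COLS = ['1', '2', '3', '4', '5', '6', '7', '8', '9']
--
--
-- def _buildPeerIndex():
--     index = {}
--     for ri, r in enumerate(_ROWS):
--         for ci, c in enumerate(_COLS):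
--             peers = []
--             for x in _COLS:
--                 if x != c:
--                     peers.append(r + x)
--             for x in _ROWS:
--                 if x != r:
--                     peers.append(x + c)
--             for x in _ROWS[ri // 3 * 3: ri // 3 * 3 + 3]:
--                 for y in _COLS[ci // 3 * 3: ci // 3 * 3 + 3]:
--                     if x != r and y != c:
--                         peers.append(x + y)
--             index[r + c] = peers
--     return index
--
--
-- _PEER_INDEX = _buildPeerIndex()
--
--
-- def getReducedDomains(varVals, orgDomains, unassigned_var):
--     # Count how many assigned peers carry each value, then keep every domain
--     # entry beyond its removal budget in one pass.
--     counts = {}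
--     for p in _PEER_INDEX.get(unassigned_var, []):
--         v = varVals.get(p, '0')
--         if v != '0':
--             counts[v] = counts.get(v, 0) + 1
--     kept = []
--     for x in orgDomains:
--         if counts.get(x, 0) > 0:
--             counts[x] -= 1
--         else:
--             kept.append(x)
--     orgDomains[:] = kept
--     return orgDomains
-- ===== Notes on version B (the rewrite author's own statement) =====
-- stated objective: alternative
-- what changed: Replaces the per-call scan of all 27 constraint lists with dedup-by-membership and repeated list.remove by a module-level arithmetic peer index (cell -> its 20 row/col/box peers, built once) plus a value-count table and one keep/drop pass over the domain list.
import Mathlib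
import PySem

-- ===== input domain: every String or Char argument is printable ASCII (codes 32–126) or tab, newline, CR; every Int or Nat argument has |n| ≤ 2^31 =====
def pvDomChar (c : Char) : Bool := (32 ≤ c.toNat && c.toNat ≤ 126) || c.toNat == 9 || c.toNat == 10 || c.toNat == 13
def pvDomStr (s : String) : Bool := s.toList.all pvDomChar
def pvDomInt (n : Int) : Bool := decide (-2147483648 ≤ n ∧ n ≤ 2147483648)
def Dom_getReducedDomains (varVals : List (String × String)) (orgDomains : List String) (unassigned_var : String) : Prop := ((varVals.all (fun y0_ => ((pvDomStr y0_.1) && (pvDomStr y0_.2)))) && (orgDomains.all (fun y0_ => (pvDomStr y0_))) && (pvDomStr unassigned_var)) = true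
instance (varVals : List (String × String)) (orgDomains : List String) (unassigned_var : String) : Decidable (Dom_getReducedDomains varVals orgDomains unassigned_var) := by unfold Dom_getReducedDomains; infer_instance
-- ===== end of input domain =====

-- B replaces A's per-call scan of all 27 constraint lists (with dedup and repeated
-- list.remove) by a precomputed arithmetic peer index plus a counting pass.
-- Equivalence is about the RETURN value; both Pythons update orgDomains in place.

-- ===== PORT A =====
def pvConstraints : List (List String) := [
  ["A1", "A2", "A3", "A4", "A5", "A6", "A7", "A8", "A9"],
  ["B1", "B2", "B3", "B4", "B5", "B6", "B7", "B8", "B9"],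
  ["C1", "C2", "C3", "C4", "C5", "C6", "C7", "C8", "C9"],
  ["D1", "D2", "D3", "D4", "D5", "D6", "D7", "D8", "D9"],
  ["E1", "E2", "E3", "E4", "E5", "E6", "E7", "E8", "E9"],
  ["F1", "F2", "F3", "F4", "F5", "F6", "F7", "F8", "F9"],
  ["G1", "G2", "G3", "G4", "G5", "G6", "G7", "G8", "G9"],
  ["H1", "H2", "H3", "H4", "H5", "H6", "H7", "H8", "H9"],
  ["I1", "I2", "I3", "I4", "I5", "I6", "I7", "I8", "I9"],
  ["A1", "B1", "C1", "D1", "E1", "F1", "G1", "H1", "I1"],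
  ["A2", "B2", "C2", "D2", "E2", "F2", "G2", "H2", "I2"],
  ["A3", "B3", "C3", "D3", "E3", "F3", "G3", "H3", "I3"],
  ["A4", "B4", "C4", "D4", "E4", "F4", "G4", "H4", "I4"],
  ["A5", "B5", "C5", "D5", "E5", "F5", "G5", "H5", "I5"],
  ["A6", "B6", "C6", "D6", "E6", "F6", "G6", "H6", "I6"],
  ["A7", "B7", "C7", "D7", "E7", "F7", "G7", "H7", "I7"],
  ["A8", "B8", "C8", "D8", "E8", "F8", "G8", "H8", "I8"],
  ["A9", "B9", "C9", "D9", "E9", "F9", "G9", "H9", "I9"],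
  ["A1", "A2", "A3", "B1", "B2", "B3", "C1", "C2", "C3"],
  ["D1", "D2", "D3", "E1", "E2", "E3", "F1", "F2", "F3"],
  ["G1", "G2", "G3", "H1", "H2", "H3", "I1", "I2", "I3"],
  ["A4", "A5", "A6", "B4", "B5", "B6", "C4", "C5", "C6"],
  ["D4", "D5", "D6", "E4", "E5", "E6", "F4", "F5", "F6"],
  ["G4", "G5", "G6", "H4", "H5", "H6", "I4", "I5", "I6"],
  ["A7", "A8", "A9", "B7", "B8", "B9", "C7", "C8", "C9"],
  ["D7", "D8", "D9", "E7", "E8", "E9", "F7", "F8", "F9"],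
  ["G7", "G8", "G9", "H7", "H8", "H9", "I7", "I8", "I9"]]

def getReducedDomains (varVals : List (String × String)) (orgDomains : List String) (unassigned_var : String) : List String :=
  let assigned_vars : List String := pvConstraints.foldl (fun acc constraint =>
    if unassigned_var ∈ constraint then
      constraint.foldl (fun acc el =>
        if el ≠ unassigned_var ∧ el ∉ acc ∧
            PySem.Dict.getD (PySem.Dict.mk varVals) el "0" ≠ "0" then acc ++ [el] else acc) acc
    else acc) []
  -- varVals[el]: on this path el is always a key with value ≠ "0", so getD is exact
  assigned_vars.foldl (fun od el =>
    let v := PySem.Dict.getD (PySem.Dict.mk varVals) el "0"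
    if v ∈ od then od.erase v else od) orgDomains

-- ===== PORT B =====
def pvRowsB : List String := ["A", "B", "C", "D", "E", "F", "G", "H", "I"]
def pvColsB : List String := ["1", "2", "3", "4", "5", "6", "7", "8", "9"]

def pvPeerIndex : PySem.Dict String (List String) :=
  (PySem.List.enumerate pvRowsB).foldl (fun index rp =>
    (PySem.List.enumerate pvColsB).foldl (fun index cp =>
      let ri := rp.1; let r := rp.2; let ci := cp.1; let c := cp.2
      let peers := pvColsB.foldl (fun ps x => if x ≠ c then ps ++ [r ++ x] else ps) []
      let peers := pvRowsB.foldl (fun ps x => if x ≠ r then ps ++ [x ++ c] else ps) peers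
      let peers := (PySem.List.slice pvRowsB (some (PySem.Int.floordiv ri 3 * 3))
          (some (PySem.Int.floordiv ri 3 * 3 + 3))).foldl (fun ps x =>
        (PySem.List.slice pvColsB (some (PySem.Int.floordiv ci 3 * 3))
            (some (PySem.Int.floordiv ci 3 * 3 + 3))).foldl (fun ps y =>
          if x ≠ r ∧ y ≠ c then ps ++ [x ++ y] else ps) ps) peers
      index.insert (r ++ c) peers) index) PySem.Dict.empty

def getReducedDomains_alt (varVals : List (String × String)) (orgDomains : List String) (unassigned_var : String) : List String :=
  let counts : PySem.Dict String Int :=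
    (PySem.Dict.getD pvPeerIndex unassigned_var []).foldl (fun counts p =>
      let v := PySem.Dict.getD (PySem.Dict.mk varVals) p "0"
      if v ≠ "0" then counts.insert v (counts.getD v 0 + 1) else counts) PySem.Dict.empty
  (orgDomains.foldl (fun (st : List String × PySem.Dict String Int) x =>
    if st.2.getD x 0 > 0 then (st.1, st.2.insert x (st.2.getD x 0 - 1))
    else (st.1 ++ [x], st.2)) ([], counts)).1

-- ===== PRECONDITION & SPEC =====
def Spec_getReducedDomains (varVals : List (String × String)) (orgDomains : List String) (unassigned_var : String) (out : List String) : Prop := out = getReducedDomains_alt varVals orgDomains unassigned_var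
instance (varVals : List (String × String)) (orgDomains : List String) (unassigned_var : String) (out : List String) : Decidable (Spec_getReducedDomains varVals orgDomains unassigned_var out) := by unfold Spec_getReducedDomains; infer_instance

-- ===== CLAIM (what is proved, stated in full; the proofs are below) =====
def Claim_equal_getReducedDomains : Prop := ∀ (varVals : List (String × String)) (orgDomains : List String) (unassigned_var : String), Dom_getReducedDomains varVals orgDomains unassigned_var → Spec_getReducedDomains varVals orgDomains unassigned_var (getReducedDomains varVals orgDomains unassigned_var)

-- ===== LEMMAS AND PROOFS =====

-- keep-first dedup of a list, skipping u (models A's assigned_vars scan without the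
-- "assigned" filter)
def pvDD (u : String) : List String → List String → List String
  | acc, [] => acc
  | acc, el :: rest => if el ≠ u ∧ el ∉ acc then pvDD u (acc ++ [el]) rest else pvDD u acc rest

def pvAPeers (u : String) : List String :=
  pvDD u [] ((pvConstraints.filter (fun c => decide (u ∈ c))).flatten)

def pvCells : List String := (pvRowsB.map (fun r => pvColsB.map (fun c => r ++ c))).flatten

-- pure model of B's keep/drop pass
def pvPassF (m : String → Int) : List String → List String
  | [] => []
  | x :: rest =>
    if m x > 0 then pvPassF (Function.update m x (m x - 1)) rest else x :: pvPassF m rest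

lemma pvScanA (u : String) (f : List String → String → List String) :
    ∀ (L : List (List String)) (acc : List String),
      L.foldl (fun acc c => if u ∈ c then c.foldl f acc else acc) acc =
        ((L.filter (fun c => decide (u ∈ c))).flatten).foldl f acc := by
  intro L
  induction L with
  | nil => intro acc; rfl
  | cons c L ih =>
    intro acc
    by_cases h : u ∈ c <;> simp [h, ih, List.foldl_append]

lemma pvDedupFilter (u : String) (p : String → Prop) [DecidablePred p] :
    ∀ (l g : List String),
      l.foldl (fun acc el => if el ≠ u ∧ el ∉ acc ∧ p el then acc ++ [el] else acc)
          (g.filter (fun el => decide (p el))) =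
        (pvDD u g l).filter (fun el => decide (p el)) := by
  intro l
  induction l with
  | nil => intro g; rfl
  | cons el rest ih =>
    intro g
    by_cases h1 : el = u
    · simp [pvDD, h1, ih]
    · by_cases h2 : el ∈ g
      · have hnot : ¬ (el ≠ u ∧ el ∉ g.filter (fun el => decide (p el)) ∧ p el) := by
          rintro ⟨-, hne, hp⟩
          exact hne (List.mem_filter.mpr ⟨h2, by simpa using hp⟩)
        simp [pvDD, h1, h2, ih]
      · have hdd : pvDD u g (el :: rest) = pvDD u (g ++ [el]) rest := by
          simp [pvDD, h1, h2]
        rw [hdd]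
        by_cases hp : p el
        · have hnf : el ∉ g.filter (fun el => decide (p el)) := fun h => h2 (List.mem_filter.mp h).1
          rw [List.foldl_cons, if_pos (And.intro h1 (And.intro hnf hp)),
            show g.filter (fun el => decide (p el)) ++ [el] =
              (g ++ [el]).filter (fun el => decide (p el)) by simp [List.filter_append, hp],
            ih (g ++ [el])]
        · rw [List.foldl_cons, if_neg (by simp [hp]),
            show g.filter (fun el => decide (p el)) =
              (g ++ [el]).filter (fun el => decide (p el)) by simp [List.filter_append, hp],
            ih (g ++ [el])]

lemma pvCountsGetD (val : String → String) :
    ∀ (l : List String) (d : PySem.Dict String Int) (w : String),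
      (l.foldl (fun counts p =>
          if val p ≠ "0" then counts.insert (val p) (counts.getD (val p) 0 + 1) else counts) d).getD w 0 =
        d.getD w 0 + (((l.filter (fun el => decide (val el ≠ "0"))).map val).count w : Int) := by
  intro l
  induction l with
  | nil => intro d w; simp
  | cons el rest ih =>
    intro d w
    rw [List.foldl_cons]
    by_cases hp : val el ≠ "0"
    · rw [if_pos hp, ih, PySem.Dict.getD_insert]
      have hd : (el :: rest).filter (fun el => decide (val el ≠ "0")) =
          el :: rest.filter (fun el => decide (val el ≠ "0")) := by
        simp [hp]
      rw [hd, List.map_cons, List.count_cons]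
      by_cases hw : w = val el
      · subst hw
        simp only [beq_self_eq_true, if_true]
        push_cast
        ring
      · have hb : (val el == w) = false := by
          simp only [beq_eq_false_iff_ne, ne_eq]
          exact fun h => hw h.symm
        simp [hb, hw]
    · rw [if_neg hp, ih]
      simp only [List.filter_cons]
      have hd : decide (val el ≠ "0") = false := by simpa using hp
      rw [hd]
      simp

lemma pvPassFold :
    ∀ (od k : List String) (c : PySem.Dict String Int),
      (od.foldl (fun (st : List String × PySem.Dict String Int) x =>
          if st.2.getD x 0 > 0 then (st.1, st.2.insert x (st.2.getD x 0 - 1))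
          else (st.1 ++ [x], st.2)) (k, c)).1 =
        k ++ pvPassF (fun v => c.getD v 0) od := by
  intro od
  induction od with
  | nil => intro k c; simp [pvPassF]
  | cons x rest ih =>
    intro k c
    by_cases h : c.getD x 0 > 0
    · have hfun : (fun v => (c.insert x (c.getD x 0 - 1)).getD v 0) =
          Function.update (fun v => c.getD v 0) x (c.getD x 0 - 1) := by
        funext v
        by_cases hv : v = x <;> simp [PySem.Dict.getD_insert, hv, Function.update_apply]
      simp only [List.foldl_cons, if_pos h, pvPassF, ih, hfun]
    · simp only [List.foldl_cons, if_neg h, pvPassF, ih, List.append_assoc, List.singleton_append]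

lemma pvPassF_zero : ∀ (m : String → Int), (∀ v, m v ≤ 0) → ∀ od, pvPassF m od = od := by
  intro m hm od
  induction od with
  | nil => rfl
  | cons x rest ih => simp [pvPassF, not_lt.mpr (hm x), ih]

lemma pvPassF_bump :
    ∀ (od : List String) (m : String → Int) (v : String), 0 ≤ m v →
      pvPassF (Function.update m v (m v + 1)) od = pvPassF m (od.erase v) := by
  intro od
  induction od with
  | nil => intro m v _; rfl
  | cons x rest ih =>
    intro m v hv
    by_cases hxv : x = v
    · subst hxv
      have hpos : Function.update m x (m x + 1) x > 0 := by simp; omega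
      have : Function.update (Function.update m x (m x + 1)) x
          (Function.update m x (m x + 1) x - 1) = m := by
        funext w
        by_cases hw : w = x <;> simp [Function.update_apply, hw]
      rw [List.erase_cons_head]
      simp only [pvPassF, if_pos hpos, this]
    · have hne : (x == v) = false := by simpa using hxv
      rw [List.erase_cons_tail (by simpa using hxv)]
      by_cases hx : m x > 0
      · have hpos : Function.update m v (m v + 1) x > 0 := by
          simpa [Function.update_apply, hxv] using hx
        have hcomm : Function.update (Function.update m v (m v + 1)) x
              (Function.update m v (m v + 1) x - 1) =
            Function.update (Function.update m x (m x - 1)) v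
              (Function.update m x (m x - 1) v + 1) := by
          funext w
          by_cases hw1 : w = x
          · subst hw1; simp [Function.update_apply, hxv]
          · by_cases hw2 : w = v <;>
              simp [Function.update_apply, hw1, hw2, hxv, Ne.symm hxv]
        have hv' : 0 ≤ Function.update m x (m x - 1) v := by
          simpa [Function.update_apply, Ne.symm hxv] using hv
        simp only [pvPassF, if_pos hpos, if_pos hx, hcomm, ih _ _ hv']
      · have hpos : ¬ Function.update m v (m v + 1) x > 0 := by
          simpa [Function.update_apply, hxv] using hx
        simp only [pvPassF, if_neg hpos, if_neg hx, ih _ _ hv]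

lemma pvPassF_count :
    ∀ (vs od : List String),
      pvPassF (fun v => (vs.count v : Int)) od = vs.foldl (fun od v => od.erase v) od := by
  intro vs
  induction vs with
  | nil =>
    intro od
    simp only [List.count_nil, Int.ofNat_zero, List.foldl_nil]
    exact pvPassF_zero _ (fun v => le_refl 0) od
  | cons v vs ih =>
    intro od
    have hfun : (fun w => (((v :: vs).count w : Nat) : Int)) =
        Function.update (fun w => ((vs.count w : Nat) : Int)) v ((vs.count v : Int) + 1) := by
      funext w
      by_cases hw : w = v
      · subst hw
        simp
      · simp [hw, Ne.symm hw]
    rw [hfun, pvPassF_bump od _ v (by positivity), ih]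
    rfl

-- facts about the concrete tables, checked by evaluation
set_option maxRecDepth 100000 in
set_option maxHeartbeats 4000000 in
lemma pvKeysPeerIndex : pvPeerIndex.keys = pvCells := by decide
set_option maxRecDepth 100000 in
set_option maxHeartbeats 4000000 in
lemma pvConstraintsCells : ∀ c ∈ pvConstraints, ∀ el ∈ c, el ∈ pvCells := by decide
set_option maxRecDepth 400000 in
set_option maxHeartbeats 16000000 in
lemma pvPeerIndexCorrect : ∀ u ∈ pvCells, PySem.Dict.getD pvPeerIndex u [] = pvAPeers u := by decide

lemma pvPeersEq (u : String) : PySem.Dict.getD pvPeerIndex u [] = pvAPeers u := by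
  by_cases h : u ∈ pvCells
  · exact pvPeerIndexCorrect u h
  · have hfilter : pvConstraints.filter (fun c => decide (u ∈ c)) = [] := by
      rw [List.filter_eq_nil_iff]
      intro c hc
      simp only [decide_eq_true_eq]
      exact fun hu => h (pvConstraintsCells c hc u hu)
    have hnk : ¬ u ∈ pvPeerIndex.keys := by rw [pvKeysPeerIndex]; exact h
    have hg : pvPeerIndex.get? u = none := by
      rw [PySem.Dict.get?_eq_none_iff_not_mem_keys]
      exact hnk
    rw [PySem.Dict.getD_eq_get?_getD, hg]
    unfold pvAPeers
    rw [hfilter]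
    rfl

theorem pvMain (varVals : List (String × String)) (orgDomains : List String) (u : String) :
    getReducedDomains varVals orgDomains u = getReducedDomains_alt varVals orgDomains u := by
  unfold getReducedDomains getReducedDomains_alt
  set val : String → String := fun el => PySem.Dict.getD (PySem.Dict.mk varVals) el "0" with hval
  -- A's assigned_vars is the filtered dedup peer list
  rw [pvScanA u _ pvConstraints []]
  have hassigned :
      ((pvConstraints.filter (fun c => decide (u ∈ c))).flatten).foldl
          (fun acc el => if el ≠ u ∧ el ∉ acc ∧ val el ≠ "0" then acc ++ [el] else acc) [] =
        (pvAPeers u).filter (fun el => decide (val el ≠ "0")) := by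
    have := pvDedupFilter u (fun el => val el ≠ "0")
      ((pvConstraints.filter (fun c => decide (u ∈ c))).flatten) []
    simpa [pvAPeers] using this
  rw [hassigned]
  -- A's removal loop is foldl erase over the values
  have herase :
      ∀ (l : List String) (od : List String),
        l.foldl (fun od el => if val el ∈ od then od.erase (val el) else od) od =
          (l.map val).foldl (fun od v => od.erase v) od := by
    intro l
    induction l with
    | nil => intro od; rfl
    | cons el rest ih =>
      intro od
      by_cases h : val el ∈ od
      · simp [h, ih]
      · simp [h, ih, List.erase_of_not_mem h]
  rw [herase]
  -- B's counts table counts exactly those values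
  rw [pvPassFold orgDomains []]
  have hcounts : (fun v => (((PySem.Dict.getD pvPeerIndex u []).foldl (fun counts p =>
        if val p ≠ "0" then counts.insert (val p) (counts.getD (val p) 0 + 1) else counts)
        PySem.Dict.empty)).getD v 0) =
      fun v => ((((pvAPeers u).filter (fun el => decide (val el ≠ "0"))).map val).count v : Int) := by
    funext v
    rw [pvPeersEq u, pvCountsGetD val (pvAPeers u) PySem.Dict.empty v]
    simp
  rw [hcounts, pvPassF_count]
  rfl

-- ===== VERDICT (by name: the statement is the Claim_ definition above) =====
theorem getReducedDomains_spec : Claim_equal_getReducedDomains := by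
  intro varVals orgDomains unassigned_var _
  exact pvMain varVals orgDomains unassigned_var
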